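-- pv_equiv track=rewrite | github.com/WayneMuse/CPSC-335-Project3 | alg1.py | spread_of_fire
-- ===== SOURCE A (Python) =====
-- from collections import deque
--
-- def spread_of_fire(forest):
--     if not forest:
--         return -1
--
--     rows, cols = len(forest), len(forest[0])
--     queue = deque()
--     healthy_trees = 0
--     days = 0
--     directions = [(0,1), (1,0), (0,-1), (-1,0)]
--     for r in range(rows):
--         for c in range(cols):
--             if forest[r][c] == 2:
--                 queue.append((r, c, 0))
--             elif forest[r][c] == 1:
--                 healthy_trees += 1
--
--
--     if healthy_trees == 0:
--         return 0
--     if not queue: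
--         return -1
--
--     while queue:
--         r, c, d = queue.popleft()
--         for dr, dc in directions:
--             nr, nc = r + dr, c + dc
--             if 0 <= nr < rows and 0 <= nc < cols and forest[nr][nc] == 1:
--                 forest[nr][nc] = 2
--                 healthy_trees -= 1
--                 queue.append((nr, nc, d + 1))
--                 days = d + 1
--
--     return days if healthy_trees == 0 else -1
-- ===== SOURCE B (Python) =====
-- def spread_of_fire(forest):
--     if not forest:
--         return -1
--
--     rows, cols = len(forest), len(forest[0])
--     healthy_trees = 0
--     has_fire = False
--     for r in range(rows):
--         for c in range(cols):
--             if forest[r][c] == 1: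
--                 healthy_trees += 1
--             elif forest[r][c] == 2:
--                 has_fire = True
--
--     if healthy_trees == 0:
--         return 0
--     if not has_fire:
--         return -1
--
--     days = 0
--     while True:
--         to_burn = [(r, c)
--                    for r in range(rows) for c in range(cols)
--                    if forest[r][c] == 1 and any(
--                        0 <= r + dr < rows and 0 <= c + dc < cols
--                        and forest[r + dr][c + dc] == 2
--                        for dr, dc in ((0, 1), (1, 0), (0, -1), (-1, 0)))]
--         if not to_burn:
--             break
--         for r, c in to_burn:
--             forest[r][c] = 2
--         healthy_trees -= len(to_burn)
--         days += 1
--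
--     return days if healthy_trees == 0 else -1
-- ===== Notes on version B (the rewrite author's own statement) =====
-- stated objective: alternative
-- what changed: Replaces the depth-tagged BFS deque with a day-by-day flood-fill: each round rescans the whole grid, collects every healthy cell orthogonally adjacent to a burning cell, burns them all at once and counts rounds.
import Mathlib
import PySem

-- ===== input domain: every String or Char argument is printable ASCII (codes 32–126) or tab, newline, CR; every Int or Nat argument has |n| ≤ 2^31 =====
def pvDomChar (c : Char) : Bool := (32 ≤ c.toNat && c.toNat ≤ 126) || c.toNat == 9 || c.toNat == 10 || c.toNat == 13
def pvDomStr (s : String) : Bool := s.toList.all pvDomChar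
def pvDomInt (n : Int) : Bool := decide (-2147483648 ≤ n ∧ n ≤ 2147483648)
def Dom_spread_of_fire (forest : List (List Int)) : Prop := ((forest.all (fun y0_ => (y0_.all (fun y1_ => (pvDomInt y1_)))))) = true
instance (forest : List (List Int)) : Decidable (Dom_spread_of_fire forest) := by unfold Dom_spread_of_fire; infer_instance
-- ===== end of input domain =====

-- B replaces A's depth-tagged BFS deque by a day-by-day whole-grid rescan flood fill (alternative algorithm,
-- same return value); both A and B mutate `forest` in place in Python, burning exactly the same cells, and the
-- theorem below is about the return value.

-- ===== PORT A =====
def pvDirs : List (Int × Int) := [(0,1),(1,0),(0,-1),(-1,0)]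

-- forest[r][c] (indices known nonnegative and in range at every use admitted by Pre_)
def pvCell (f : List (List Int)) (r c : Int) : Int := (f.getD r.toNat []).getD c.toNat 0

-- forest[r][c] = 2
def pvBurn (f : List (List Int)) (r c : Int) : List (List Int) :=
  f.set r.toNat ((f.getD r.toNat []).set c.toNat 2)

-- number of 1-cells, the termination measure of both loops
def pvCount1 (f : List (List Int)) : Nat :=
  (f.map (fun row => (row.filter (fun v => v == 1)).length)).sum

-- one step of A's `for dr, dc in directions` loop; state = (forest, healthy, appended entries, days)
def pvTryBurn (rows cols r c d : Int)
    (s : List (List Int) × Int × List (Int × Int × Int) × Int) (dir : Int × Int) :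
    List (List Int) × Int × List (Int × Int × Int) × Int :=
  if 0 ≤ r + dir.1 ∧ r + dir.1 < rows ∧ 0 ≤ c + dir.2 ∧ c + dir.2 < cols ∧
      pvCell s.1 (r + dir.1) (c + dir.2) = 1 then
    (pvBurn s.1 (r + dir.1) (c + dir.2), s.2.1 - 1,
      s.2.2.1 ++ [(r + dir.1, c + dir.2, d + 1)], d + 1)
  else s

-- termination facts for the two loops (cited by `decreasing_by`)
theorem pvRowCount_set (row : List Int) (n : Nat) (h : row.getD n 0 = 1) :
    ((row.set n 2).filter (fun v => v == 1)).length + 1 = (row.filter (fun v => v == 1)).length := by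
  induction row generalizing n with
  | nil => simp at h
  | cons a t ih =>
    cases n with
    | zero =>
      simp only [List.getD_cons_zero] at h
      subst h
      simp
    | succ m =>
      simp only [List.getD_cons_succ] at h
      have := ih m h
      by_cases ha : a = 1 <;> simp [List.set, ha] <;> omega

theorem pvCount1_set_aux (f : List (List Int)) (n m : Nat)
    (h : (f.getD n []).getD m 0 = 1) :
    pvCount1 (f.set n ((f.getD n []).set m 2)) + 1 = pvCount1 f := by
  induction f generalizing n with
  | nil => simp at h
  | cons row t ih =>
    cases n with
    | zero =>
      simp only [List.getD_cons_zero] at h ⊢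
      simp only [List.set, pvCount1, List.map_cons, List.sum_cons]
      have := pvRowCount_set row m h
      omega
    | succ k =>
      simp only [List.getD_cons_succ] at h ⊢
      simp only [List.set, pvCount1, List.map_cons, List.sum_cons]
      have := ih k h
      simp only [pvCount1] at this
      omega

theorem pvCount1_pvBurn (f : List (List Int)) (r c : Int) (h : pvCell f r c = 1) :
    pvCount1 (pvBurn f r c) + 1 = pvCount1 f :=
  pvCount1_set_aux f r.toNat c.toNat h

theorem pvRowCount_set_le (row : List Int) (n : Nat) :
    ((row.set n 2).filter (fun v => v == 1)).length ≤ (row.filter (fun v => v == 1)).length := by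
  induction row generalizing n with
  | nil => simp
  | cons a t ih =>
    cases n with
    | zero => by_cases ha : a = 1 <;> simp [List.set, ha]
    | succ m =>
      have := ih m
      by_cases ha : a = 1 <;> simp [List.set, ha] <;> omega

theorem pvCount1_set_le_aux (f : List (List Int)) (n m : Nat) :
    pvCount1 (f.set n ((f.getD n []).set m 2)) ≤ pvCount1 f := by
  induction f generalizing n with
  | nil => simp [pvCount1]
  | cons row t ih =>
    cases n with
    | zero =>
      simp only [List.getD_cons_zero, List.set, pvCount1, List.map_cons, List.sum_cons]
      have := pvRowCount_set_le row m
      omega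
    | succ k =>
      simp only [List.getD_cons_succ, List.set, pvCount1, List.map_cons, List.sum_cons]
      have := ih k
      simp only [pvCount1] at this
      omega

theorem pvCount1_pvBurn_le (f : List (List Int)) (r c : Int) :
    pvCount1 (pvBurn f r c) ≤ pvCount1 f :=
  pvCount1_set_le_aux f r.toNat c.toNat

theorem pvTryBurn_meas (rows cols r c d : Int) (ds : List (Int × Int))
    (s : List (List Int) × Int × List (Int × Int × Int) × Int) :
    pvCount1 (List.foldl (pvTryBurn rows cols r c d) s ds).1 +
      ((List.foldl (pvTryBurn rows cols r c d) s ds).2.2.1).length =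
    pvCount1 s.1 + (s.2.2.1).length := by
  induction ds generalizing s with
  | nil => rfl
  | cons dir ds ih =>
    simp only [List.foldl_cons, pvTryBurn]
    split
    · next hc =>
      rw [ih]
      have := pvCount1_pvBurn s.1 (r + dir.1) (c + dir.2) hc.2.2.2.2
      simp only [List.length_append, List.length_cons, List.length_nil]
      omega
    · exact ih s

-- A's `while queue:` loop
def pvRunA (rows cols : Int) (f : List (List Int)) (q : List (Int × Int × Int)) (h days : Int) : Int :=
  match q with
  | [] => if h = 0 then days else -1
  | (r, c, d) :: rest =>
    let s := List.foldl (pvTryBurn rows cols r c d) (f, h, ([] : List (Int × Int × Int)), days) pvDirs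
    pvRunA rows cols s.1 (rest ++ s.2.2.1) s.2.1 s.2.2.2
termination_by q.length + pvCount1 f
decreasing_by
  have := pvTryBurn_meas rows cols r c d pvDirs (f, h, ([] : List (Int × Int × Int)), days)
  simp only [List.length_append, List.length_cons, List.length_nil] at this ⊢
  omega

-- A's initial double scan: state = (queue, healthy)
def pvInitA (f : List (List Int)) (rows cols : Int) : List (Int × Int × Int) × Int :=
  (List.range rows.toNat).foldl (fun st (r : Nat) =>
    (List.range cols.toNat).foldl (fun st (c : Nat) =>
      if pvCell f (r : Int) (c : Int) = 2 then (st.1 ++ [((r : Int), (c : Int), (0 : Int))], st.2)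
      else if pvCell f (r : Int) (c : Int) = 1 then (st.1, st.2 + 1) else st) st) (([] : List (Int × Int × Int)), (0 : Int))

def spread_of_fire (forest : List (List Int)) : Int :=
  if forest = [] then -1
  else
    let rows : Int := (forest.length : Int)
    let cols : Int := ((forest.headD []).length : Int)
    let init := pvInitA forest rows cols
    if init.2 = 0 then 0
    else if init.1 = [] then -1
    else pvRunA rows cols forest init.1 init.2 0

-- ===== PORT B =====
-- B's list comprehension: healthy cells adjacent to a burning cell, row-major
def pvScanB (f : List (List Int)) (rows cols : Int) : List (Int × Int) :=
  (List.range rows.toNat).flatMap (fun (r : Nat) =>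
    (List.range cols.toNat).filterMap (fun (c : Nat) =>
      if pvCell f (r : Int) (c : Int) = 1 ∧ ∃ dir ∈ pvDirs, (0 ≤ (r : Int) + dir.1 ∧ (r : Int) + dir.1 < rows ∧ 0 ≤ (c : Int) + dir.2 ∧ (c : Int) + dir.2 < cols ∧ pvCell f ((r : Int) + dir.1) ((c : Int) + dir.2) = 2)
      then some ((r : Int), (c : Int)) else none))

-- `for r, c in to_burn: forest[r][c] = 2`
def pvBurnAll (f : List (List Int)) (ps : List (Int × Int)) : List (List Int) :=
  ps.foldl (fun g p => pvBurn g p.1 p.2) f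

theorem pvCount1_pvBurnAll_le (f : List (List Int)) (ps : List (Int × Int)) :
    pvCount1 (pvBurnAll f ps) ≤ pvCount1 f := by
  induction ps generalizing f with
  | nil => exact le_refl _
  | cons p ps ih =>
    calc pvCount1 (pvBurnAll (pvBurn f p.1 p.2) ps) ≤ pvCount1 (pvBurn f p.1 p.2) := ih _
    _ ≤ pvCount1 f := pvCount1_pvBurn_le f p.1 p.2

theorem pvScanB_cell_one (f : List (List Int)) (rows cols : Int) (p : Int × Int)
    (h : p ∈ pvScanB f rows cols) : pvCell f p.1 p.2 = 1 := by
  simp only [pvScanB, List.mem_flatMap, List.mem_filterMap] at h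
  obtain ⟨r, -, c, -, hc⟩ := h
  split at hc
  · next hcond =>
    simp only [Option.some.injEq] at hc
    subst hc
    exact hcond.1
  · simp at hc

-- B's `while True:` loop
def pvRunB (rows cols : Int) (f : List (List Int)) (h days : Int) : Int :=
  let tb := pvScanB f rows cols
  if htb : tb = [] then (if h = 0 then days else -1)
  else pvRunB rows cols (pvBurnAll f tb) (h - (tb.length : Int)) (days + 1)
termination_by pvCount1 f
decreasing_by
  obtain ⟨p, ps, e⟩ := List.exists_cons_of_ne_nil htb
  have e' : pvScanB f rows cols = p :: ps := e
  have h1 : pvCell f p.1 p.2 = 1 :=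
    pvScanB_cell_one f rows cols p (by rw [e']; exact List.mem_cons_self)
  have h2 := pvCount1_pvBurn (f := f) (r := p.1) (c := p.2) h1
  have h3 := pvCount1_pvBurnAll_le (pvBurn f p.1 p.2) ps
  have h4 : pvBurnAll f (pvScanB f rows cols) = pvBurnAll (pvBurn f p.1 p.2) ps := by
    rw [e']; rfl
  simp only [h4]
  omega

-- B's initial double scan: state = (healthy, has_fire)
def pvInitB (f : List (List Int)) (rows cols : Int) : Int × Bool :=
  (List.range rows.toNat).foldl (fun st (r : Nat) =>
    (List.range cols.toNat).foldl (fun st (c : Nat) =>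
      if pvCell f (r : Int) (c : Int) = 1 then (st.1 + 1, st.2)
      else if pvCell f (r : Int) (c : Int) = 2 then (st.1, true) else st) st) ((0 : Int), false)

def spread_of_fire_alt (forest : List (List Int)) : Int :=
  if forest = [] then -1
  else
    let rows : Int := (forest.length : Int)
    let cols : Int := ((forest.headD []).length : Int)
    let init := pvInitB forest rows cols
    if init.1 = 0 then 0
    else if init.2 = false then -1
    else pvRunB rows cols forest init.1 0

-- ===== PRECONDITION & SPEC =====
-- Pre_ excludes exactly the ragged grids on which A raises IndexError (a row shorter than row 0,
-- reached by the row-major scan over range(len(forest[0]))).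
def Pre_spread_of_fire (forest : List (List Int)) : Prop :=
  ∀ row ∈ forest, (forest.headD []).length ≤ row.length

instance (forest : List (List Int)) : Decidable (Pre_spread_of_fire forest) := by
  unfold Pre_spread_of_fire; infer_instance

def pvWitness_spread_of_fire : List (List Int) := [[2, 1], [1, 1]]

def Spec_spread_of_fire (forest : List (List Int)) (out : Int) : Prop := out = spread_of_fire_alt forest
instance (forest : List (List Int)) (out : Int) : Decidable (Spec_spread_of_fire forest out) := by unfold Spec_spread_of_fire; infer_instance

-- ===== CLAIM (what is proved, stated in full; the proofs are below) =====
def Claim_equal_spread_of_fire : Prop := ∀ (forest : List (List Int)), Dom_spread_of_fire forest → Pre_spread_of_fire forest → Spec_spread_of_fire forest (spread_of_fire forest)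

-- ===== LEMMAS AND PROOFS =====

-- ---- proof-layer vocabulary ----
def pvInb (rows cols : Int) (p : Int × Int) : Prop :=
  0 ≤ p.1 ∧ p.1 < rows ∧ 0 ≤ p.2 ∧ p.2 < cols

def pvShift (p dir : Int × Int) : Int × Int := (p.1 + dir.1, p.2 + dir.2)

def pvTag (d : Int) (ps : List (Int × Int)) : List (Int × Int × Int) :=
  ps.map (fun p => (p.1, p.2, d))

-- cells burned while processing one queue cell, and the forest afterwards
def pvBurnsOf (rows cols r c : Int) : List (List Int) → List (Int × Int) → List (List Int) × List (Int × Int)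
  | f, [] => (f, [])
  | f, dir :: ds =>
    if 0 ≤ r + dir.1 ∧ r + dir.1 < rows ∧ 0 ≤ c + dir.2 ∧ c + dir.2 < cols ∧
        pvCell f (r + dir.1) (c + dir.2) = 1 then
      let t := pvBurnsOf rows cols r c (pvBurn f (r + dir.1) (c + dir.2)) ds
      (t.1, (r + dir.1, c + dir.2) :: t.2)
    else pvBurnsOf rows cols r c f ds

-- cells burned while processing one whole BFS level, and the forest afterwards
def pvProc (rows cols : Int) : List (List Int) → List (Int × Int) → List (List Int) × List (Int × Int)
  | f, [] => (f, [])
  | f, p :: rest =>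
    let t := pvBurnsOf rows cols p.1 p.2 f pvDirs
    let u := pvProc rows cols t.1 rest
    (u.1, t.2 ++ u.2)

def pvShape (rows cols : Int) (f : List (List Int)) : Prop :=
  (f.length : Int) = rows ∧ ∀ row ∈ f, cols ≤ (row.length : Int)

def pvInv (rows cols : Int) (f : List (List Int)) (front : List (Int × Int)) : Prop :=
  (∀ p ∈ front, pvInb rows cols p ∧ pvCell f p.1 p.2 = 2) ∧
  (∀ p, pvInb rows cols p → pvCell f p.1 p.2 = 2 → p ∉ front →
    ∀ dir ∈ pvDirs, pvInb rows cols (pvShift p dir) →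
      pvCell f (pvShift p dir).1 (pvShift p dir).2 ≠ 1)

def pvRow2 (f : List (List Int)) (r : Nat) (cols : Int) : List (Int × Int) :=
  (List.range cols.toNat).filterMap
    (fun (c : Nat) => if pvCell f (r : Int) (c : Int) = 2 then some ((r : Int), (c : Int)) else none)

def pvFront0 (f : List (List Int)) (rows cols : Int) : List (Int × Int) :=
  (List.range rows.toNat).flatMap (fun (r : Nat) => pvRow2 f r cols)

def pvRow1 (f : List (List Int)) (r : Nat) (cols : Int) : Nat :=
  ((List.range cols.toNat).filter (fun (c : Nat) => decide (pvCell f (r : Int) (c : Int) = 1))).length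

def pvH0 (f : List (List Int)) (rows cols : Int) : Nat :=
  ((List.range rows.toNat).map (fun r => pvRow1 f r cols)).sum

-- ---- basic cell/burn lemmas ----
theorem pvGetD_set_eq {A : Type} (l : List A) (n : Nat) (a d : A) (h : n < l.length) :
    (l.set n a).getD n d = a := by
  rw [List.getD_eq_getElem?_getD, List.getElem?_set_self h]
  rfl

theorem pvGetD_set_ne {A : Type} (l : List A) (n m : Nat) (a d : A) (h : n ≠ m) :
    (l.set n a).getD m d = l.getD m d := by
  rw [List.getD_eq_getElem?_getD, List.getElem?_set_ne h, ← List.getD_eq_getElem?_getD]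

theorem pvGetD_oob {A : Type} (l : List A) (n : Nat) (d : A) (h : l.length ≤ n) :
    l.getD n d = d := by
  rw [List.getD_eq_getElem?_getD, List.getElem?_eq_none h]
  rfl

theorem pvCell_ne_zero_phys (f : List (List Int)) (r c : Int) (h : pvCell f r c ≠ 0) :
    r.toNat < f.length ∧ c.toNat < (f.getD r.toNat []).length := by
  unfold pvCell at h
  by_cases hn : r.toNat < f.length
  · refine ⟨hn, ?_⟩
    by_cases hm : c.toNat < (f.getD r.toNat []).length
    · exact hm
    · rw [pvGetD_oob _ _ _ (by omega)] at h
      simp at h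
  · rw [pvGetD_oob f r.toNat [] (by omega)] at h
    simp at h

theorem pvBurn_length (f : List (List Int)) (r c : Int) : (pvBurn f r c).length = f.length := by
  simp [pvBurn]

theorem pvBurn_row_length (f : List (List Int)) (r c : Int) (i : Nat) :
    ((pvBurn f r c).getD i []).length = (f.getD i []).length := by
  unfold pvBurn
  by_cases hi : i = r.toNat
  · by_cases hr : r.toNat < f.length
    · rw [hi, pvGetD_set_eq _ _ _ _ hr, List.length_set]
    · rw [List.set_eq_of_length_le (l := f) (i := r.toNat) (by omega)]
  · rw [pvGetD_set_ne _ _ _ _ _ (by omega)]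

theorem pvCell_pvBurn_self (f : List (List Int)) (r c : Int)
    (h1 : r.toNat < f.length) (h2 : c.toNat < (f.getD r.toNat []).length) :
    pvCell (pvBurn f r c) r c = 2 := by
  unfold pvCell pvBurn
  rw [pvGetD_set_eq _ _ _ _ h1, pvGetD_set_eq _ _ _ _ h2]

theorem pvCell_pvBurn_ne (f : List (List Int)) (r c r' c' : Int)
    (hr : 0 ≤ r) (hc : 0 ≤ c) (hr' : 0 ≤ r') (hc' : 0 ≤ c')
    (hne : (r, c) ≠ (r', c')) :
    pvCell (pvBurn f r c) r' c' = pvCell f r' c' := by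
  unfold pvCell pvBurn
  by_cases hrow : r.toNat = r'.toNat
  · have hrr : r = r' := by omega
    subst hrr
    have hcc : c.toNat ≠ c'.toNat := by
      intro hcn
      exact hne (by rw [show c = c' from by omega])
    by_cases hlt : r.toNat < f.length
    · rw [pvGetD_set_eq _ _ _ _ hlt, pvGetD_set_ne _ _ _ _ _ hcc]
    · rw [List.set_eq_of_length_le (l := f) (i := r.toNat) (by omega)]
  · rw [pvGetD_set_ne _ _ _ _ _ hrow]

theorem pvCell_pvBurn_two (f : List (List Int)) (p q : Int × Int)
    (hp : 0 ≤ p.1 ∧ 0 ≤ p.2) (hq : 0 ≤ q.1 ∧ 0 ≤ q.2)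
    (h2 : pvCell f q.1 q.2 = 2) :
    pvCell (pvBurn f p.1 p.2) q.1 q.2 = 2 := by
  by_cases hpq : (p.1, p.2) = (q.1, q.2)
  · obtain ⟨e1, e2⟩ := Prod.mk.injEq .. ▸ hpq
    rw [e1, e2]
    have hphys := pvCell_ne_zero_phys f q.1 q.2 (by omega)
    exact pvCell_pvBurn_self f q.1 q.2 hphys.1 hphys.2
  · rw [pvCell_pvBurn_ne f p.1 p.2 q.1 q.2 hp.1 hp.2 hq.1 hq.2 hpq]
    exact h2

-- ---- pvBurnAll lemmas ----
theorem pvBurnAll_length (f : List (List Int)) (L : List (Int × Int)) :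
    (pvBurnAll f L).length = f.length := by
  induction L generalizing f with
  | nil => rfl
  | cons p L ih => rw [show pvBurnAll f (p :: L) = pvBurnAll (pvBurn f p.1 p.2) L from rfl,
      ih, pvBurn_length]

theorem pvBurnAll_row_length (f : List (List Int)) (L : List (Int × Int)) (i : Nat) :
    ((pvBurnAll f L).getD i []).length = (f.getD i []).length := by
  induction L generalizing f with
  | nil => rfl
  | cons p L ih => rw [show pvBurnAll f (p :: L) = pvBurnAll (pvBurn f p.1 p.2) L from rfl,
      ih, pvBurn_row_length]

theorem pvCell_pvBurnAll_not_mem (f : List (List Int)) (L : List (Int × Int)) (q : Int × Int)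
    (hL : ∀ p ∈ L, 0 ≤ p.1 ∧ 0 ≤ p.2) (hq : 0 ≤ q.1 ∧ 0 ≤ q.2) (hnm : q ∉ L) :
    pvCell (pvBurnAll f L) q.1 q.2 = pvCell f q.1 q.2 := by
  induction L generalizing f with
  | nil => rfl
  | cons p L ih =>
    rw [show pvBurnAll f (p :: L) = pvBurnAll (pvBurn f p.1 p.2) L from rfl]
    rw [ih (pvBurn f p.1 p.2) (fun x hx => hL x (List.mem_cons_of_mem _ hx))
      (fun hx => hnm (List.mem_cons_of_mem _ hx))]
    have hp := hL p List.mem_cons_self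
    exact pvCell_pvBurn_ne f p.1 p.2 q.1 q.2 hp.1 hp.2 hq.1 hq.2
      (fun he => hnm (by
        have : p = q := by
          obtain ⟨e1, e2⟩ := Prod.mk.injEq .. ▸ he
          exact Prod.ext e1 e2
        rw [this]; exact List.mem_cons_self))

theorem pvCell_pvBurnAll_two (f : List (List Int)) (L : List (Int × Int)) (q : Int × Int)
    (hL : ∀ p ∈ L, 0 ≤ p.1 ∧ 0 ≤ p.2) (hq : 0 ≤ q.1 ∧ 0 ≤ q.2)
    (h2 : pvCell f q.1 q.2 = 2) :
    pvCell (pvBurnAll f L) q.1 q.2 = 2 := by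
  induction L generalizing f with
  | nil => exact h2
  | cons p L ih =>
    rw [show pvBurnAll f (p :: L) = pvBurnAll (pvBurn f p.1 p.2) L from rfl]
    exact ih (pvBurn f p.1 p.2) (fun x hx => hL x (List.mem_cons_of_mem _ hx))
      (pvCell_pvBurn_two f p q (hL p List.mem_cons_self) hq h2)

theorem pvCell_pvBurnAll_mem (f : List (List Int)) (L : List (Int × Int)) (q : Int × Int)
    (hL : ∀ p ∈ L, 0 ≤ p.1 ∧ 0 ≤ p.2) (h1 : pvCell f q.1 q.2 = 1) (hq : q ∈ L) :
    pvCell (pvBurnAll f L) q.1 q.2 = 2 := by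
  induction L generalizing f with
  | nil => simp at hq
  | cons p L ih =>
    rw [show pvBurnAll f (p :: L) = pvBurnAll (pvBurn f p.1 p.2) L from rfl]
    have hqn : 0 ≤ q.1 ∧ 0 ≤ q.2 := hL q hq
    by_cases hpq : p = q
    · subst hpq
      have hphys := pvCell_ne_zero_phys f p.1 p.2 (by omega)
      exact pvCell_pvBurnAll_two (pvBurn f p.1 p.2) L p
        (fun x hx => hL x (List.mem_cons_of_mem _ hx)) hqn
        (pvCell_pvBurn_self f p.1 p.2 hphys.1 hphys.2)
    · have hqL : q ∈ L := by
        rcases List.mem_cons.mp hq with he | hm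
        · exact absurd he.symm hpq
        · exact hm
      have hp := hL p List.mem_cons_self
      refine ih (pvBurn f p.1 p.2) (fun x hx => hL x (List.mem_cons_of_mem _ hx)) ?_ hqL
      rw [pvCell_pvBurn_ne f p.1 p.2 q.1 q.2 hp.1 hp.2 hqn.1 hqn.2
        (fun he => hpq (by
          obtain ⟨e1, e2⟩ := Prod.mk.injEq .. ▸ he
          exact Prod.ext e1 e2))]
      exact h1

-- burning the same set of healthy cells, in any order, yields the same forest
theorem pvBurnAll_ext (f : List (List Int)) (L1 L2 : List (Int × Int))
    (h1 : ∀ p ∈ L1, 0 ≤ p.1 ∧ 0 ≤ p.2 ∧ pvCell f p.1 p.2 = 1)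
    (h2 : ∀ p ∈ L2, 0 ≤ p.1 ∧ 0 ≤ p.2 ∧ pvCell f p.1 p.2 = 1)
    (hm : ∀ p, p ∈ L1 ↔ p ∈ L2) :
    pvBurnAll f L1 = pvBurnAll f L2 := by
  have hl1 : ∀ p ∈ L1, 0 ≤ p.1 ∧ 0 ≤ p.2 := fun p hp => ⟨(h1 p hp).1, (h1 p hp).2.1⟩
  have hl2 : ∀ p ∈ L2, 0 ≤ p.1 ∧ 0 ≤ p.2 := fun p hp => ⟨(h2 p hp).1, (h2 p hp).2.1⟩
  have hcell : ∀ i j : Nat,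
      pvCell (pvBurnAll f L1) (i : Int) (j : Int) = pvCell (pvBurnAll f L2) (i : Int) (j : Int) := by
    intro i j
    by_cases hm1 : (((i : Int)), ((j : Int))) ∈ L1
    · have hm2 := (hm _).mp hm1
      rw [pvCell_pvBurnAll_mem f L1 _ hl1 (h1 _ hm1).2.2 hm1,
          pvCell_pvBurnAll_mem f L2 _ hl2 (h2 _ hm2).2.2 hm2]
    · have hm2 : (((i : Int)), ((j : Int))) ∉ L2 := fun hx => hm1 ((hm _).mpr hx)
      rw [pvCell_pvBurnAll_not_mem f L1 _ hl1 ⟨Int.natCast_nonneg i, Int.natCast_nonneg j⟩ hm1,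
          pvCell_pvBurnAll_not_mem f L2 _ hl2 ⟨Int.natCast_nonneg i, Int.natCast_nonneg j⟩ hm2]
  apply List.ext_getElem
  · rw [pvBurnAll_length, pvBurnAll_length]
  intro i hi1 hi2
  apply List.ext_getElem
  · have r1 := pvBurnAll_row_length f L1 i
    have r2 := pvBurnAll_row_length f L2 i
    rw [List.getD_eq_getElem _ _ hi1] at r1
    rw [List.getD_eq_getElem _ _ hi2] at r2
    rw [r1, r2]
  intro j hj1 hj2
  have e1 : pvCell (pvBurnAll f L1) (i : Int) (j : Int) = (pvBurnAll f L1)[i][j] := by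
    unfold pvCell
    rw [Int.toNat_natCast, Int.toNat_natCast, List.getD_eq_getElem _ _ hi1,
      List.getD_eq_getElem _ _ hj1]
  have e2 : pvCell (pvBurnAll f L2) (i : Int) (j : Int) = (pvBurnAll f L2)[i][j] := by
    unfold pvCell
    rw [Int.toNat_natCast, Int.toNat_natCast, List.getD_eq_getElem _ _ hi2,
      List.getD_eq_getElem _ _ hj2]
  rw [← e1, ← e2, hcell]

-- ---- pvBurnsOf lemmas ----
theorem pvBurnsOf_fst (rows cols r c : Int) (f : List (List Int)) (ds : List (Int × Int)) :
    (pvBurnsOf rows cols r c f ds).1 = pvBurnAll f (pvBurnsOf rows cols r c f ds).2 := by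
  induction ds generalizing f with
  | nil => rfl
  | cons dir ds ih =>
    simp only [pvBurnsOf]
    split
    · simpa using ih (pvBurn f (r + dir.1) (c + dir.2))
    · exact ih f

theorem pvBurnsOf_sound (rows cols r c : Int) (f : List (List Int)) (ds : List (Int × Int)) :
    ∀ q ∈ (pvBurnsOf rows cols r c f ds).2,
      pvInb rows cols q ∧ pvCell f q.1 q.2 = 1 ∧ ∃ dir ∈ ds, q = (r + dir.1, c + dir.2) := by
  induction ds generalizing f with
  | nil => intro q hq; simp [pvBurnsOf] at hq
  | cons dir ds ih =>
    simp only [pvBurnsOf]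
    split
    · next hc =>
      intro q hq
      rcases List.mem_cons.mp hq with he | hmem
      · subst he
        exact ⟨⟨hc.1, hc.2.1, hc.2.2.1, hc.2.2.2.1⟩, hc.2.2.2.2,
          dir, List.mem_cons_self, rfl⟩
      · obtain ⟨hinb, hcel, dir', hd', he'⟩ := ih (pvBurn f (r + dir.1) (c + dir.2)) q hmem
        refine ⟨hinb, ?_, dir', List.mem_cons_of_mem _ hd', he'⟩
        by_cases hqe : (r + dir.1, c + dir.2) = (q.1, q.2)
        · exfalso
          have hphys := pvCell_ne_zero_phys f (r + dir.1) (c + dir.2) (by rw [hc.2.2.2.2]; omega)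
          have h2 := pvCell_pvBurn_self f (r + dir.1) (c + dir.2) hphys.1 hphys.2
          have hqq : q = (r + dir.1, c + dir.2) := hqe.symm
          rw [hqq] at hcel
          simp only at hcel
          omega
        · rw [pvCell_pvBurn_ne f (r + dir.1) (c + dir.2) q.1 q.2 hc.1 hc.2.2.1
            hinb.1 hinb.2.2.1 hqe] at hcel
          exact hcel
    · next =>
      intro q hq
      obtain ⟨hinb, hcel, dir', hd', he'⟩ := ih f q hq
      exact ⟨hinb, hcel, dir', List.mem_cons_of_mem _ hd', he'⟩

theorem pvBurnsOf_complete (rows cols r c : Int) (f : List (List Int)) (ds : List (Int × Int))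
    (q : Int × Int) (hq : pvInb rows cols q) (h1 : pvCell f q.1 q.2 = 1)
    (dir : Int × Int) (hd : dir ∈ ds) (he : q = (r + dir.1, c + dir.2)) :
    q ∈ (pvBurnsOf rows cols r c f ds).2 := by
  induction ds generalizing f with
  | nil => simp at hd
  | cons dir0 ds ih =>
    simp only [pvBurnsOf]
    split
    · next hc =>
      by_cases hqe : q = (r + dir0.1, c + dir0.2)
      · rw [hqe]; exact List.mem_cons_self
      · have hd' : dir ∈ ds := by
          rcases List.mem_cons.mp hd with h | h
          · exact absurd (h ▸ he) hqe
          · exact h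
        apply List.mem_cons_of_mem
        apply ih (pvBurn f (r + dir0.1) (c + dir0.2)) _ hd'
        rw [pvCell_pvBurn_ne f (r + dir0.1) (c + dir0.2) q.1 q.2 hc.1 hc.2.2.1
          hq.1 hq.2.2.1 (fun hh => hqe hh.symm)]
        exact h1
    · next hc =>
      rcases List.mem_cons.mp hd with h | h
      · exfalso
        subst he
        exact hc (h ▸ ⟨hq.1, hq.2.1, hq.2.2.1, hq.2.2.2, h1⟩)
      · exact ih f h1 h

theorem pvBurnsOf_nodup (rows cols r c : Int) (f : List (List Int)) (ds : List (Int × Int)) :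
    (pvBurnsOf rows cols r c f ds).2.Nodup := by
  induction ds generalizing f with
  | nil => exact List.nodup_nil
  | cons dir ds ih =>
    simp only [pvBurnsOf]
    split
    · next hc =>
      refine List.nodup_cons.mpr ⟨?_, ih (pvBurn f (r + dir.1) (c + dir.2))⟩
      intro hmem
      obtain ⟨-, hcel, -⟩ := pvBurnsOf_sound rows cols r c
        (pvBurn f (r + dir.1) (c + dir.2)) ds _ hmem
      have hphys := pvCell_ne_zero_phys f (r + dir.1) (c + dir.2) (by rw [hc.2.2.2.2]; omega)
      have := pvCell_pvBurn_self f (r + dir.1) (c + dir.2) hphys.1 hphys.2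
      simp only at hcel
      omega
    · exact ih f

-- ---- pvProc lemmas ----
theorem pvProc_fst (rows cols : Int) (f : List (List Int)) (front : List (Int × Int)) :
    (pvProc rows cols f front).1 = pvBurnAll f (pvProc rows cols f front).2 := by
  induction front generalizing f with
  | nil => rfl
  | cons p rest ih =>
    simp only [pvProc]
    have hb := pvBurnsOf_fst rows cols p.1 p.2 f pvDirs
    have hsound := pvBurnsOf_sound rows cols p.1 p.2 f pvDirs
    calc (pvProc rows cols (pvBurnsOf rows cols p.1 p.2 f pvDirs).1 rest).1
        = pvBurnAll (pvBurnsOf rows cols p.1 p.2 f pvDirs).1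
            (pvProc rows cols (pvBurnsOf rows cols p.1 p.2 f pvDirs).1 rest).2 := ih _
      _ = _ := by
          rw [hb, show ∀ (g : List (List Int)) (a b : List (Int × Int)),
            pvBurnAll (pvBurnAll g a) b = pvBurnAll g (a ++ b) from
              fun g a b => (List.foldl_append ..).symm]

theorem pvProc_sound (rows cols : Int) (f : List (List Int)) (front : List (Int × Int)) :
    ∀ q ∈ (pvProc rows cols f front).2,
      pvInb rows cols q ∧ pvCell f q.1 q.2 = 1 ∧
        ∃ p ∈ front, ∃ dir ∈ pvDirs, q = pvShift p dir := by
  induction front generalizing f with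
  | nil => intro q hq; simp [pvProc] at hq
  | cons p rest ih =>
    simp only [pvProc]
    intro q hq
    rcases List.mem_append.mp hq with hq1 | hq2
    · obtain ⟨hinb, hcel, dir, hd, he⟩ := pvBurnsOf_sound rows cols p.1 p.2 f pvDirs q hq1
      exact ⟨hinb, hcel, p, List.mem_cons_self, dir, hd, he⟩
    · obtain ⟨hinb, hcel, p', hp', dir, hd, he⟩ :=
        ih (pvBurnsOf rows cols p.1 p.2 f pvDirs).1 q hq2
      refine ⟨hinb, ?_, p', List.mem_cons_of_mem _ hp', dir, hd, he⟩
      rw [pvBurnsOf_fst] at hcel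
      by_cases hqb : q ∈ (pvBurnsOf rows cols p.1 p.2 f pvDirs).2
      · exact (pvBurnsOf_sound rows cols p.1 p.2 f pvDirs q hqb).2.1
      · rw [pvCell_pvBurnAll_not_mem f _ q
          (fun x hx => ⟨(pvBurnsOf_sound rows cols p.1 p.2 f pvDirs x hx).1.1,
            (pvBurnsOf_sound rows cols p.1 p.2 f pvDirs x hx).1.2.2.1⟩)
          ⟨hinb.1, hinb.2.2.1⟩ hqb] at hcel
        exact hcel

theorem pvProc_complete (rows cols : Int) (f : List (List Int)) (front : List (Int × Int))
    (q : Int × Int) (hq : pvInb rows cols q) (h1 : pvCell f q.1 q.2 = 1)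
    (p : Int × Int) (hp : p ∈ front) (dir : Int × Int) (hd : dir ∈ pvDirs)
    (he : q = pvShift p dir) :
    q ∈ (pvProc rows cols f front).2 := by
  induction front generalizing f with
  | nil => simp at hp
  | cons p0 rest ih =>
    simp only [pvProc]
    apply List.mem_append.mpr
    rcases List.mem_cons.mp hp with hpe | hpm
    · exact Or.inl (pvBurnsOf_complete rows cols p0.1 p0.2 f pvDirs q hq h1 dir hd
        (by rw [hpe] at he; exact he))
    · by_cases hqb : q ∈ (pvBurnsOf rows cols p0.1 p0.2 f pvDirs).2
      · exact Or.inl hqb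
      · refine Or.inr (ih (pvBurnsOf rows cols p0.1 p0.2 f pvDirs).1 ?_ hpm)
        rw [pvBurnsOf_fst, pvCell_pvBurnAll_not_mem f _ q
          (fun x hx => ⟨(pvBurnsOf_sound rows cols p0.1 p0.2 f pvDirs x hx).1.1,
            (pvBurnsOf_sound rows cols p0.1 p0.2 f pvDirs x hx).1.2.2.1⟩)
          ⟨hq.1, hq.2.2.1⟩ hqb]
        exact h1

theorem pvProc_nodup (rows cols : Int) (f : List (List Int)) (front : List (Int × Int)) :
    (pvProc rows cols f front).2.Nodup := by
  induction front generalizing f with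
  | nil => exact List.nodup_nil
  | cons p rest ih =>
    simp only [pvProc]
    rw [List.nodup_append]
    refine ⟨pvBurnsOf_nodup rows cols p.1 p.2 f pvDirs, ih _, ?_⟩
    intro q hq1 q' hq2 hqq
    subst hqq
    obtain ⟨hinb1, hcel1, -⟩ := pvBurnsOf_sound rows cols p.1 p.2 f pvDirs q hq1
    obtain ⟨-, hcel2, -⟩ := pvProc_sound rows cols _ rest q hq2
    rw [pvBurnsOf_fst] at hcel2
    have h2 : pvCell (pvBurnAll f (pvBurnsOf rows cols p.1 p.2 f pvDirs).2) q.1 q.2 = 2 :=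
      pvCell_pvBurnAll_mem f _ q
        (fun x hx => ⟨(pvBurnsOf_sound rows cols p.1 p.2 f pvDirs x hx).1.1,
          (pvBurnsOf_sound rows cols p.1 p.2 f pvDirs x hx).1.2.2.1⟩) hcel1 hq1
    omega

-- ---- A's loop processes the queue level by level ----
theorem pvFoldl_tryBurn (rows cols r c d : Int) (ds : List (Int × Int)) (f : List (List Int))
    (h : Int) (acc : List (Int × Int × Int)) (days : Int) :
    List.foldl (pvTryBurn rows cols r c d) (f, h, acc, days) ds =
      ((pvBurnsOf rows cols r c f ds).1,
       h - ((pvBurnsOf rows cols r c f ds).2.length : Int),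
       acc ++ pvTag (d + 1) (pvBurnsOf rows cols r c f ds).2,
       if (pvBurnsOf rows cols r c f ds).2 = [] then days else d + 1) := by
  induction ds generalizing f h acc days with
  | nil => simp [pvBurnsOf, pvTag]
  | cons dir ds ih =>
    simp only [List.foldl_cons, pvTryBurn, pvBurnsOf]
    by_cases hc : 0 ≤ r + dir.1 ∧ r + dir.1 < rows ∧ 0 ≤ c + dir.2 ∧ c + dir.2 < cols ∧
        pvCell f (r + dir.1) (c + dir.2) = 1
    · rw [if_pos hc, if_pos hc,
        ih (pvBurn f (r + dir.1) (c + dir.2)) (h - 1) (acc ++ [(r + dir.1, c + dir.2, d + 1)]) (d + 1)]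
      refine congrArg₂ Prod.mk rfl (congrArg₂ Prod.mk ?_ (congrArg₂ Prod.mk ?_ ?_))
      · simp only [List.length_cons]
        push_cast
        ring
      · simp [pvTag]
      · simp
    · rw [if_neg hc, if_neg hc]
      exact ih f h acc days

theorem pvRunA_nil (rows cols : Int) (f : List (List Int)) (h days : Int) :
    pvRunA rows cols f [] h days = if h = 0 then days else -1 := by
  rw [pvRunA]

theorem pvRunA_cons (rows cols : Int) (f : List (List Int)) (r c d : Int)
    (rest : List (Int × Int × Int)) (h days : Int) :
    pvRunA rows cols f ((r, c, d) :: rest) h days =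
      pvRunA rows cols (List.foldl (pvTryBurn rows cols r c d) (f, h, [], days) pvDirs).1
        (rest ++ (List.foldl (pvTryBurn rows cols r c d) (f, h, [], days) pvDirs).2.2.1)
        (List.foldl (pvTryBurn rows cols r c d) (f, h, [], days) pvDirs).2.1
        (List.foldl (pvTryBurn rows cols r c d) (f, h, [], days) pvDirs).2.2.2 := by
  rw [pvRunA]

theorem pvTag_append (d : Int) (a b : List (Int × Int)) :
    pvTag d (a ++ b) = pvTag d a ++ pvTag d b := by
  simp [pvTag]

theorem pvRunA_level (rows cols : Int) (front next : List (Int × Int)) (f : List (List Int))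
    (h d days : Int) :
    pvRunA rows cols f (pvTag d front ++ pvTag (d + 1) next) h days =
      pvRunA rows cols (pvProc rows cols f front).1
        (pvTag (d + 1) (next ++ (pvProc rows cols f front).2))
        (h - ((pvProc rows cols f front).2.length : Int))
        (if (pvProc rows cols f front).2 = [] then days else d + 1) := by
  induction front generalizing f h days next with
  | nil => simp [pvProc, pvTag]
  | cons p rest ih =>
    have hq : pvTag d (p :: rest) ++ pvTag (d + 1) next =
        (p.1, p.2, d) :: (pvTag d rest ++ pvTag (d + 1) next) := by simp [pvTag]
    rw [hq, pvRunA_cons, pvFoldl_tryBurn]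
    simp only [List.nil_append]
    rw [List.append_assoc, ← pvTag_append]
    rw [ih (next ++ (pvBurnsOf rows cols p.1 p.2 f pvDirs).2)
      ((pvBurnsOf rows cols p.1 p.2 f pvDirs).1)
      (h - ((pvBurnsOf rows cols p.1 p.2 f pvDirs).2.length : Int))
      (if (pvBurnsOf rows cols p.1 p.2 f pvDirs).2 = [] then days else d + 1)]
    simp only [pvProc]
    have e1 : (next ++ (pvBurnsOf rows cols p.1 p.2 f pvDirs).2) ++
        (pvProc rows cols (pvBurnsOf rows cols p.1 p.2 f pvDirs).1 rest).2 =
        next ++ ((pvBurnsOf rows cols p.1 p.2 f pvDirs).2 ++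
          (pvProc rows cols (pvBurnsOf rows cols p.1 p.2 f pvDirs).1 rest).2) := by
      simp
    have e2 : h - ((pvBurnsOf rows cols p.1 p.2 f pvDirs).2.length : Int) -
        ((pvProc rows cols (pvBurnsOf rows cols p.1 p.2 f pvDirs).1 rest).2.length : Int) =
        h - (((pvBurnsOf rows cols p.1 p.2 f pvDirs).2 ++
          (pvProc rows cols (pvBurnsOf rows cols p.1 p.2 f pvDirs).1 rest).2).length : Int) := by
      rw [List.length_append]
      push_cast
      ring
    have e3 : (if (pvProc rows cols (pvBurnsOf rows cols p.1 p.2 f pvDirs).1 rest).2 = []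
        then (if (pvBurnsOf rows cols p.1 p.2 f pvDirs).2 = [] then days else d + 1) else d + 1) =
        (if (pvBurnsOf rows cols p.1 p.2 f pvDirs).2 ++
          (pvProc rows cols (pvBurnsOf rows cols p.1 p.2 f pvDirs).1 rest).2 = []
        then days else d + 1) := by
      by_cases h1 : (pvBurnsOf rows cols p.1 p.2 f pvDirs).2 = [] <;>
        by_cases h2 : (pvProc rows cols (pvBurnsOf rows cols p.1 p.2 f pvDirs).1 rest).2 = [] <;>
        simp [h1, h2]
    rw [e1, e2, e3]
    rfl

theorem pvRunB_eq (rows cols : Int) (f : List (List Int)) (h days : Int) :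
    pvRunB rows cols f h days =
      if pvScanB f rows cols = [] then (if h = 0 then days else -1)
      else pvRunB rows cols (pvBurnAll f (pvScanB f rows cols))
        (h - ((pvScanB f rows cols).length : Int)) (days + 1) := by
  rw [pvRunB]
  simp only [dite_eq_ite]

-- ---- membership / nodup of the row-major grid scans ----
theorem pvGrid_mem (P : Int → Int → Prop) [inst : ∀ r c, Decidable (P r c)]
    (rows cols : Int) (q : Int × Int) :
    q ∈ (List.range rows.toNat).flatMap (fun (r : Nat) => (List.range cols.toNat).filterMap
        (fun (c : Nat) => if P (r : Int) (c : Int) then some ((r : Int), (c : Int)) else none)) ↔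
      pvInb rows cols q ∧ P q.1 q.2 := by
  simp only [List.mem_flatMap, List.mem_filterMap, List.mem_range]
  constructor
  · rintro ⟨r, hr, c, hc, hif⟩
    split at hif
    · next hP =>
      simp only [Option.some.injEq] at hif
      subst hif
      exact ⟨⟨by omega, by omega, by omega, by omega⟩, hP⟩
    · simp at hif
  · rintro ⟨hinb, hP⟩
    obtain ⟨ha, hb, hc, hd⟩ := hinb
    refine ⟨q.1.toNat, by omega, q.2.toNat, by omega, ?_⟩
    have e1 : ((q.1.toNat : Nat) : Int) = q.1 := by omega
    have e2 : ((q.2.toNat : Nat) : Int) = q.2 := by omega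
    rw [e1, e2, if_pos hP]

theorem pvGrid_nodup (P : Int → Int → Prop) [inst : ∀ r c, Decidable (P r c)]
    (rows cols : Int) :
    ((List.range rows.toNat).flatMap (fun (r : Nat) => (List.range cols.toNat).filterMap
        (fun (c : Nat) => if P (r : Int) (c : Int) then some ((r : Int), (c : Int)) else none))).Nodup := by
  have hmem1 : ∀ (r : Nat) (q : Int × Int),
      q ∈ (List.range cols.toNat).filterMap
        (fun (c : Nat) => if P (r : Int) (c : Int) then some ((r : Int), (c : Int)) else none) →
      q.1 = (r : Int) := by
    intro r q hq
    simp only [List.mem_filterMap] at hq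
    obtain ⟨c, -, hif⟩ := hq
    split at hif
    · simp only [Option.some.injEq] at hif
      subst hif
      rfl
    · simp at hif
  have hinner : ∀ r : Nat, ((List.range cols.toNat).filterMap
      (fun (c : Nat) => if P (r : Int) (c : Int) then some ((r : Int), (c : Int)) else none)).Nodup := by
    intro r
    refine List.Nodup.filterMap ?_ List.nodup_range
    intro a a' b hb hb'
    split at hb
    · split at hb'
      · rw [Option.mem_def, Option.some.injEq] at hb hb'
        have := congrArg Prod.snd (hb.trans hb'.symm)
        simp only at this
        omega
      · simp at hb'
    · simp at hb
  suffices aux : ∀ rs : List Nat, rs.Nodup → (rs.flatMap (fun (r : Nat) => (List.range cols.toNat).filterMap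
      (fun (c : Nat) => if P (r : Int) (c : Int) then some ((r : Int), (c : Int)) else none))).Nodup from
    aux _ List.nodup_range
  intro rs hrs
  induction rs with
  | nil => exact List.nodup_nil
  | cons r rs ih =>
    obtain ⟨hnr, hrs'⟩ := List.nodup_cons.mp hrs
    rw [List.flatMap_cons, List.nodup_append]
    refine ⟨hinner r, ih hrs', ?_⟩
    intro a ha b hb hab
    subst hab
    have h1 := hmem1 r a ha
    simp only [List.mem_flatMap] at hb
    obtain ⟨r', hr', hbr'⟩ := hb
    have h2 := hmem1 r' a hbr'
    have : r = r' := by omega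
    subst this
    exact hnr hr'

theorem pvScanB_mem (f : List (List Int)) (rows cols : Int) (q : Int × Int) :
    q ∈ pvScanB f rows cols ↔
      pvInb rows cols q ∧ pvCell f q.1 q.2 = 1 ∧
        ∃ dir ∈ pvDirs, (0 ≤ q.1 + dir.1 ∧ q.1 + dir.1 < rows ∧ 0 ≤ q.2 + dir.2 ∧ q.2 + dir.2 < cols ∧ pvCell f (q.1 + dir.1) (q.2 + dir.2) = 2) := by
  unfold pvScanB
  exact pvGrid_mem (fun r c => pvCell f r c = 1 ∧ ∃ dir ∈ pvDirs, (0 ≤ r + dir.1 ∧ r + dir.1 < rows ∧ 0 ≤ c + dir.2 ∧ c + dir.2 < cols ∧ pvCell f (r + dir.1) (c + dir.2) = 2))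
    rows cols q

theorem pvScanB_nodup (f : List (List Int)) (rows cols : Int) : (pvScanB f rows cols).Nodup := by
  exact pvGrid_nodup (fun r c => pvCell f r c = 1 ∧ ∃ dir ∈ pvDirs, (0 ≤ r + dir.1 ∧ r + dir.1 < rows ∧ 0 ≤ c + dir.2 ∧ c + dir.2 < cols ∧ pvCell f (r + dir.1) (c + dir.2) = 2))
    rows cols

theorem pvFront0_mem (f : List (List Int)) (rows cols : Int) (q : Int × Int) :
    q ∈ pvFront0 f rows cols ↔ pvInb rows cols q ∧ pvCell f q.1 q.2 = 2 := by
  unfold pvFront0 pvRow2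
  exact pvGrid_mem (fun r c => pvCell f r c = 2) rows cols q

-- ---- the two initial scans ----
theorem pvInitA_inner (f : List (List Int)) (r : Nat) (cs : List Nat)
    (st : List (Int × Int × Int) × Int) :
    List.foldl (fun st (c : Nat) =>
      if pvCell f (r : Int) (c : Int) = 2 then (st.1 ++ [((r : Int), (c : Int), (0 : Int))], st.2)
      else if pvCell f (r : Int) (c : Int) = 1 then (st.1, st.2 + 1) else st) st cs =
    (st.1 ++ pvTag 0 (cs.filterMap (fun (c : Nat) =>
        if pvCell f (r : Int) (c : Int) = 2 then some ((r : Int), (c : Int)) else none)),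
     st.2 + ((cs.filter (fun (c : Nat) => decide (pvCell f (r : Int) (c : Int) = 1))).length : Int)) := by
  induction cs generalizing st with
  | nil => simp [pvTag]
  | cons c cs ih =>
    simp only [List.foldl_cons, List.filterMap_cons, List.filter_cons]
    by_cases h2 : pvCell f (r : Int) (c : Int) = 2
    · have h1 : ¬ pvCell f (r : Int) (c : Int) = 1 := by omega
      rw [if_pos h2, if_pos h2, ih]
      simp [h1, pvTag]
    · rw [if_neg h2, if_neg h2]
      by_cases h1 : pvCell f (r : Int) (c : Int) = 1
      · rw [if_pos h1, ih]
        refine congrArg₂ Prod.mk rfl ?_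
        simp only [h1, decide_true, if_true, List.length_cons]
        omega
      · rw [if_neg h1, ih]
        simp [h1]

theorem pvInitA_outer (f : List (List Int)) (cols : Int) (rs : List Nat)
    (st : List (Int × Int × Int) × Int) :
    List.foldl (fun st (r : Nat) =>
      List.foldl (fun st (c : Nat) =>
        if pvCell f (r : Int) (c : Int) = 2 then (st.1 ++ [((r : Int), (c : Int), (0 : Int))], st.2)
        else if pvCell f (r : Int) (c : Int) = 1 then (st.1, st.2 + 1) else st) st
        (List.range cols.toNat)) st rs =
    (st.1 ++ pvTag 0 (rs.flatMap (fun (r : Nat) => pvRow2 f r cols)),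
     st.2 + (((rs.map (fun (r : Nat) => pvRow1 f r cols)).sum : Nat) : Int)) := by
  induction rs generalizing st with
  | nil => simp [pvTag]
  | cons r rs ih =>
    rw [List.foldl_cons, pvInitA_inner, ih]
    rw [List.flatMap_cons, List.map_cons, List.sum_cons, pvTag_append]
    refine congrArg₂ Prod.mk ?_ ?_
    · rw [List.append_assoc]
      rfl
    · show _ + _ + _ = _
      push_cast
      rw [add_assoc]
      rfl

theorem pvInitA_eq (f : List (List Int)) (rows cols : Int) :
    pvInitA f rows cols = (pvTag 0 (pvFront0 f rows cols), (pvH0 f rows cols : Int)) := by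
  unfold pvInitA pvFront0 pvH0
  rw [pvInitA_outer]
  simp

theorem pvInitB_inner (f : List (List Int)) (r : Nat) (cs : List Nat) (st : Int × Bool) :
    List.foldl (fun st (c : Nat) =>
      if pvCell f (r : Int) (c : Int) = 1 then (st.1 + 1, st.2)
      else if pvCell f (r : Int) (c : Int) = 2 then (st.1, true) else st) st cs =
    (st.1 + ((cs.filter (fun (c : Nat) => decide (pvCell f (r : Int) (c : Int) = 1))).length : Int),
     st.2 || decide (∃ c ∈ cs, pvCell f (r : Int) (c : Int) = 2)) := by
  induction cs generalizing st with
  | nil => simp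
  | cons c cs ih =>
    simp only [List.foldl_cons, List.filter_cons]
    by_cases h1 : pvCell f (r : Int) (c : Int) = 1
    · have h2 : ¬ pvCell f (r : Int) (c : Int) = 2 := by omega
      rw [if_pos h1, ih]
      refine congrArg₂ Prod.mk ?_ ?_
      · simp only [h1, decide_true, if_true, List.length_cons]
        omega
      · simp [h2]
    · rw [if_neg h1]
      by_cases h2 : pvCell f (r : Int) (c : Int) = 2
      · rw [if_pos h2, ih]
        simp [h2]
      · rw [if_neg h2, ih]
        simp [h1, h2]

theorem pvInitB_outer (f : List (List Int)) (cols : Int) (rs : List Nat) (st : Int × Bool) :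
    List.foldl (fun st (r : Nat) =>
      List.foldl (fun st (c : Nat) =>
        if pvCell f (r : Int) (c : Int) = 1 then (st.1 + 1, st.2)
        else if pvCell f (r : Int) (c : Int) = 2 then (st.1, true) else st) st
        (List.range cols.toNat)) st rs =
    (st.1 + (((rs.map (fun (r : Nat) => pvRow1 f r cols)).sum : Nat) : Int),
     st.2 || decide (∃ r ∈ rs, ∃ c ∈ List.range cols.toNat, pvCell f (r : Int) (c : Int) = 2)) := by
  induction rs generalizing st with
  | nil => simp
  | cons r rs ih =>
    rw [List.foldl_cons, pvInitB_inner, ih]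
    rw [List.map_cons, List.sum_cons]
    refine congrArg₂ Prod.mk ?_ ?_
    · show _ + _ + _ = _
      push_cast
      rw [add_assoc]
      rfl
    · have : (∃ r1 ∈ r :: rs, ∃ c ∈ List.range cols.toNat, pvCell f (r1 : Int) (c : Int) = 2) ↔
          ((∃ c ∈ List.range cols.toNat, pvCell f (r : Int) (c : Int) = 2) ∨
            (∃ r1 ∈ rs, ∃ c ∈ List.range cols.toNat, pvCell f (r1 : Int) (c : Int) = 2)) := by
        constructor
        · rintro ⟨r1, hr1, hc⟩
          rcases List.mem_cons.mp hr1 with he | hm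
          · exact Or.inl (he ▸ hc)
          · exact Or.inr ⟨r1, hm, hc⟩
        · rintro (h | ⟨r1, hm, hc⟩)
          · exact ⟨r, List.mem_cons_self, h⟩
          · exact ⟨r1, List.mem_cons_of_mem _ hm, hc⟩
      rw [decide_eq_decide.mpr this, Bool.decide_or, Bool.or_assoc]

theorem pvInitB_eq (f : List (List Int)) (rows cols : Int) :
    pvInitB f rows cols = ((pvH0 f rows cols : Int), decide (pvFront0 f rows cols ≠ [])) := by
  unfold pvInitB pvH0
  rw [pvInitB_outer]
  refine congrArg₂ Prod.mk (by simp) ?_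
  simp only [Bool.false_or]
  rw [decide_eq_decide]
  constructor
  · rintro ⟨r, hr, c, hc, h2⟩
    intro hnil
    have : ((r : Int), (c : Int)) ∈ pvFront0 f rows cols := by
      rw [pvFront0_mem]
      simp only [List.mem_range] at hr hc
      exact ⟨⟨by omega, by omega, by omega, by omega⟩, h2⟩
    rw [hnil] at this
    simp at this
  · intro hne
    obtain ⟨q, hq⟩ := List.exists_mem_of_ne_nil _ hne
    rw [pvFront0_mem] at hq
    obtain ⟨⟨h1, h2, h3, h4⟩, hcell⟩ := hq
    refine ⟨q.1.toNat, by simp only [List.mem_range]; omega,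
      q.2.toNat, by simp only [List.mem_range]; omega, ?_⟩
    have e1 : ((q.1.toNat : Nat) : Int) = q.1 := by omega
    have e2 : ((q.2.toNat : Nat) : Int) = q.2 := by omega
    rw [e1, e2]
    exact hcell

-- ---- geometry ----
theorem pvDirs_neg : ∀ dir ∈ pvDirs, ∃ dir' ∈ pvDirs, ∀ p : Int × Int, pvShift (pvShift p dir) dir' = p := by
  intro dir hdir
  simp only [pvDirs, List.mem_cons, List.not_mem_nil, or_false] at hdir
  rcases hdir with h | h | h | h <;> subst h
  · exact ⟨(0, -1), by simp [pvDirs], fun p => by simp [pvShift]⟩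
  · exact ⟨(-1, 0), by simp [pvDirs], fun p => by simp [pvShift]⟩
  · exact ⟨(0, 1), by simp [pvDirs], fun p => by simp [pvShift]⟩
  · exact ⟨(1, 0), by simp [pvDirs], fun p => by simp [pvShift]⟩

-- ---- the per-day round: B's rescan finds exactly A's next BFS level ----
theorem pvRound_mem (rows cols : Int) (f : List (List Int)) (front : List (Int × Int))
    (_hs : pvShape rows cols f) (hi : pvInv rows cols f front) (q : Int × Int) :
    q ∈ pvScanB f rows cols ↔ q ∈ (pvProc rows cols f front).2 := by
  rw [pvScanB_mem]
  constructor
  · rintro ⟨hinb, h1, dir, hd, hnb⟩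
    obtain ⟨dir', hd', hinv⟩ := pvDirs_neg dir hd
    have hpinb : pvInb rows cols (pvShift q dir) := ⟨hnb.1, hnb.2.1, hnb.2.2.1, hnb.2.2.2.1⟩
    have hp2 : pvCell f (pvShift q dir).1 (pvShift q dir).2 = 2 := hnb.2.2.2.2
    have hsq : pvShift (pvShift q dir) dir' = q := hinv q
    by_cases hpf : pvShift q dir ∈ front
    · exact pvProc_complete rows cols f front q hinb h1 (pvShift q dir) hpf dir' hd' hsq.symm
    · exfalso
      have hne1 := hi.2 (pvShift q dir) hpinb hp2 hpf dir' hd' (by rw [hsq]; exact hinb)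
      rw [hsq] at hne1
      exact hne1 h1
  · intro hq
    obtain ⟨hinb, h1, p, hpf, dir, hd, he⟩ := pvProc_sound rows cols f front q hq
    obtain ⟨hp_inb, hp2⟩ := hi.1 p hpf
    obtain ⟨dir', hd', hinv⟩ := pvDirs_neg dir hd
    refine ⟨hinb, h1, dir', hd', ?_⟩
    have hqp : pvShift q dir' = p := by rw [he]; exact hinv p
    have e1 : q.1 + dir'.1 = p.1 := congrArg Prod.fst hqp
    have e2 : q.2 + dir'.2 = p.2 := congrArg Prod.snd hqp
    exact ⟨by rw [e1]; exact hp_inb.1, by rw [e1]; exact hp_inb.2.1,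
      by rw [e2]; exact hp_inb.2.2.1, by rw [e2]; exact hp_inb.2.2.2,
      by rw [e1, e2]; exact hp2⟩

theorem pvRound_forest (rows cols : Int) (f : List (List Int)) (front : List (Int × Int))
    (hs : pvShape rows cols f) (hi : pvInv rows cols f front) :
    pvBurnAll f (pvScanB f rows cols) = (pvProc rows cols f front).1 := by
  rw [pvProc_fst]
  apply pvBurnAll_ext f
  · intro p hp
    rw [pvScanB_mem] at hp
    exact ⟨hp.1.1, hp.1.2.2.1, hp.2.1⟩
  · intro p hp
    have := pvProc_sound rows cols f front p hp
    exact ⟨this.1.1, this.1.2.2.1, this.2.1⟩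
  · exact pvRound_mem rows cols f front hs hi

theorem pvRound_length (rows cols : Int) (f : List (List Int)) (front : List (Int × Int))
    (hs : pvShape rows cols f) (hi : pvInv rows cols f front) :
    (pvScanB f rows cols).length = (pvProc rows cols f front).2.length := by
  exact ((List.perm_ext_iff_of_nodup (pvScanB_nodup f rows cols)
    (pvProc_nodup rows cols f front)).mpr (pvRound_mem rows cols f front hs hi)).length_eq

theorem pvShape_next (rows cols : Int) (f : List (List Int)) (front : List (Int × Int))
    (hs : pvShape rows cols f) :
    pvShape rows cols (pvProc rows cols f front).1 := by
  rw [pvProc_fst]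
  refine ⟨by rw [pvBurnAll_length]; exact hs.1, ?_⟩
  intro row hrow
  obtain ⟨i, hi, he⟩ := List.mem_iff_getElem.mp hrow
  have hlen := pvBurnAll_row_length f (pvProc rows cols f front).2 i
  rw [List.getD_eq_getElem _ _ hi] at hlen
  have hif : i < f.length := by
    have := pvBurnAll_length f (pvProc rows cols f front).2
    omega
  have hmem : f.getD i [] ∈ f := by
    rw [List.getD_eq_getElem _ _ hif]
    exact List.getElem_mem hif
  have := hs.2 _ hmem
  rw [← he]
  omega

theorem pvInv_next (rows cols : Int) (f : List (List Int)) (front : List (Int × Int))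
    (_hs : pvShape rows cols f) (hi : pvInv rows cols f front) :
    pvInv rows cols (pvProc rows cols f front).1 (pvProc rows cols f front).2 := by
  have hNn : ∀ x ∈ (pvProc rows cols f front).2, 0 ≤ x.1 ∧ 0 ≤ x.2 := fun x hx =>
    ⟨(pvProc_sound rows cols f front x hx).1.1, (pvProc_sound rows cols f front x hx).1.2.2.1⟩
  constructor
  · intro p hp
    obtain ⟨hinb, h1, -⟩ := pvProc_sound rows cols f front p hp
    refine ⟨hinb, ?_⟩
    rw [pvProc_fst]
    exact pvCell_pvBurnAll_mem f _ p hNn h1 hp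
  · intro p hpinb hp2 hpnm dir hd hsinb
    rw [pvProc_fst] at hp2 ⊢
    by_cases hqN : pvShift p dir ∈ (pvProc rows cols f front).2
    · have h2 := pvCell_pvBurnAll_mem f _ (pvShift p dir) hNn
        (pvProc_sound rows cols f front _ hqN).2.1 hqN
      omega
    · rw [pvCell_pvBurnAll_not_mem f _ (pvShift p dir) hNn ⟨hsinb.1, hsinb.2.2.1⟩ hqN]
      have hp2f : pvCell f p.1 p.2 = 2 := by
        rw [pvCell_pvBurnAll_not_mem f _ p hNn ⟨hpinb.1, hpinb.2.2.1⟩ hpnm] at hp2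
        exact hp2
      by_cases hpf : p ∈ front
      · intro h1q
        exact hqN (pvProc_complete rows cols f front _ hsinb h1q p hpf dir hd rfl)
      · exact hi.2 p hpinb hp2f hpf dir hd hsinb

-- ---- main loop equivalence ----
theorem pvMain (rows cols : Int) (n : Nat) :
    ∀ (f : List (List Int)) (front : List (Int × Int)) (h d : Int),
      pvCount1 f = n → pvShape rows cols f → pvInv rows cols f front →
      pvRunA rows cols f (pvTag d front) h d = pvRunB rows cols f h d := by
  induction n using Nat.strong_induction_on with
  | _ n ih =>
    intro f front h d hn hs hiv
    have hA := pvRunA_level rows cols front [] f h d d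
    rw [show pvTag (d + 1) ([] : List (Int × Int)) = [] from rfl, List.append_nil,
      List.nil_append] at hA
    rw [hA, pvRunB_eq]
    have hmm := pvRound_mem rows cols f front hs hiv
    by_cases hsc : pvScanB f rows cols = []
    · rw [if_pos hsc]
      have hnew : (pvProc rows cols f front).2 = [] := by
        rw [List.eq_nil_iff_forall_not_mem]
        intro x hx
        have := (hmm x).mpr hx
        rw [hsc] at this
        simp at this
      rw [hnew]
      rw [show pvTag (d + 1) ([] : List (Int × Int)) = [] from rfl, pvRunA_nil]
      simp
    · rw [if_neg hsc]
      have hnew : (pvProc rows cols f front).2 ≠ [] := by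
        obtain ⟨x, hx⟩ := List.exists_mem_of_ne_nil _ hsc
        intro hN
        have := (hmm x).mp hx
        rw [hN] at this
        simp at this
      rw [if_neg hnew, pvRound_forest rows cols f front hs hiv,
        pvRound_length rows cols f front hs hiv]
      refine ih (pvCount1 (pvProc rows cols f front).1) ?_ _ (pvProc rows cols f front).2 _
        (d + 1) rfl (pvShape_next rows cols f front hs) (pvInv_next rows cols f front hs hiv)
      obtain ⟨x, xs, hX⟩ := List.exists_cons_of_ne_nil hnew
      have hx1 : pvCell f x.1 x.2 = 1 :=
        (pvProc_sound rows cols f front x (by rw [hX]; exact List.mem_cons_self)).2.1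
      have hb := pvCount1_pvBurn f x.1 x.2 hx1
      have hle : pvCount1 (pvBurnAll (pvBurn f x.1 x.2) xs) ≤ pvCount1 (pvBurn f x.1 x.2) :=
        pvCount1_pvBurnAll_le _ xs
      rw [pvProc_fst, hX]
      have : pvBurnAll f (x :: xs) = pvBurnAll (pvBurn f x.1 x.2) xs := rfl
      rw [this]
      omega

theorem spread_of_fire_spec : Claim_equal_spread_of_fire := by
  intro forest hdom hpre
  unfold Spec_spread_of_fire spread_of_fire spread_of_fire_alt
  by_cases hf : forest = []
  · rw [if_pos hf, if_pos hf]
  · rw [if_neg hf, if_neg hf]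
    simp only [pvInitA_eq, pvInitB_eq]
    by_cases h0 : pvH0 forest (forest.length : Int) ((forest.head?.getD []).length : Int) = 0
    · simp [h0]
    · by_cases hfr : pvFront0 forest (forest.length : Int)
          ((forest.head?.getD []).length : Int) = []
      · simp [h0, hfr, pvTag]
      · have hshape : pvShape (forest.length : Int) ((forest.head?.getD []).length : Int)
            forest := by
          refine ⟨rfl, ?_⟩
          intro row hrow
          have h := hpre row hrow
          rw [List.headD_eq_head?_getD] at h
          exact_mod_cast h
        have hinv : pvInv (forest.length : Int) ((forest.head?.getD []).length : Int) forest
            (pvFront0 forest (forest.length : Int) ((forest.head?.getD []).length : Int)) := by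
          constructor
          · intro p hp
            exact (pvFront0_mem forest _ _ p).mp hp
          · intro p hinb h2 hnm dir hd hsinb
            exact absurd ((pvFront0_mem forest _ _ p).mpr ⟨hinb, h2⟩) hnm
        have hmain := pvMain (forest.length : Int) ((forest.head?.getD []).length : Int)
          (pvCount1 forest) forest
          (pvFront0 forest (forest.length : Int) ((forest.head?.getD []).length : Int))
          (pvH0 forest (forest.length : Int) ((forest.head?.getD []).length : Int) : Int) 0 rfl
          hshape hinv
        have htag : pvTag 0 (pvFront0 forest (forest.length : Int)
            ((forest.head?.getD []).length : Int)) ≠ [] := by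
          simp only [pvTag, ne_eq, List.map_eq_nil_iff]
          exact hfr
        simp only [pvTag] at hmain
        simp [h0, hfr, hmain, pvTag]
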